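-- pv_equiv track=rewrite | github.com/JeonheonKim/Python | algorithm_practice/Month_2/Number_7.py | solution
-- ===== SOURCE A (Python) =====
-- import itertools
--
-- def solution(n):
--     result = 0
--     num2 = 0
--     while True:
--         num1 = n- num2*2
--
--         if num1 < 0: break
--
--         jp1 = [1]*num1 + [2]*num2
--         result += len(list(itertools.combinations(jp1,num2)))
--
--         num2 += 1
--
--     answer = result % 1234567
--     return answer
-- ===== SOURCE B (Python) =====
-- def solution(n):
--     # Fibonacci-style DP: sum_k C(n-k, k) = Fib(n+1); no tilings for negative n.
--     if n < 0:
--         return 0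
--     a, b = 0, 1
--     for _ in range(n):
--         a, b = b, (a + b) % 1234567
--     return b
-- ===== Notes on version B (the rewrite author's own statement) =====
-- stated objective: faster
-- what changed: Replaces the exponential enumeration of all combination tuples (whose count is C(n-k,k), summed over k) by the linear Fibonacci recurrence with modular reduction at each step, using the identity sum_k C(n-k,k) = fib(n+1).
import Mathlib
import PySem

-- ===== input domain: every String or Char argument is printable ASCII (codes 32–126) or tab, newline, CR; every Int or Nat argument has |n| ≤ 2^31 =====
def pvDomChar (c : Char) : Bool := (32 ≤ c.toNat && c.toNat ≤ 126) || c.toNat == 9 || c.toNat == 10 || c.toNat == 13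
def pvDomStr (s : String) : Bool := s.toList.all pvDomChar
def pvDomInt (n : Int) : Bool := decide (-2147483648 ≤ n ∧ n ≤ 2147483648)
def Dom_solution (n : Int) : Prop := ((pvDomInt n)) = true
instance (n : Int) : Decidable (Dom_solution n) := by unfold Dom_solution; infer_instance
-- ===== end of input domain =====

-- B replaces A's exponential enumeration of combination tuples by the O(n) Fibonacci
-- recurrence (sum_k C(n-k,k) = fib(n+1)), reducing mod 1234567 at each step.

-- ===== PORT A =====
-- len(list(itertools.combinations(jp1, k))): the number of k-combinations of the list,
-- counted by the standard positional recursion (with x: choose k-1 from rest; without x: k from rest).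
def combCount : List Int → Nat → Nat
  | _, 0 => 1
  | [], _ + 1 => 0
  | _ :: xs, k + 1 => combCount xs k + combCount xs (k + 1)

-- the `while True` loop over num2, accumulating `result`
def loopA (n : Int) (num2 : Nat) (result : Int) : Int :=
  if n - (num2 : Int) * 2 < 0 then result
  else loopA n (num2 + 1)
    (result + (combCount (List.replicate (n - (num2 : Int) * 2).toNat (1 : Int)
                           ++ List.replicate num2 (2 : Int)) num2 : Int))
termination_by (n - (num2 : Int) * 2 + 1).toNat
decreasing_by omega

def solution (n : Int) : Int := PySem.Int.mod (loopA n 0 0) 1234567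

-- ===== PORT B =====
-- the `for _ in range(n)` loop: a, b = b, (a + b) % 1234567
def fibLoop : Nat → Int → Int → Int
  | 0, _, b => b
  | k + 1, a, b => fibLoop k b (PySem.Int.mod (a + b) 1234567)

def solution_alt (n : Int) : Int := if n < 0 then 0 else fibLoop n.toNat 0 1

-- ===== PRECONDITION & SPEC =====
def Spec_solution (n : Int) (out : Int) : Prop := out = solution_alt n
instance (n : Int) (out : Int) : Decidable (Spec_solution n out) := by unfold Spec_solution; infer_instance

-- ===== CLAIM (what is proved, stated in full; the proofs are below) =====
def Claim_equal_solution : Prop := ∀ (n : Int), Dom_solution n → Spec_solution n (solution n)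

-- ===== LEMMAS AND PROOFS =====

lemma combCount_eq (xs : List Int) : ∀ k, combCount xs k = xs.length.choose k := by
  induction xs with
  | nil => intro k; cases k <;> simp [combCount]
  | cons x xs ih =>
    intro k
    cases k with
    | zero => simp [combCount]
    | succ k => simp [combCount, ih, Nat.choose_succ_succ]

-- the diagonal binomial sum
def diagSum (n : Nat) : Nat := ∑ k ∈ Finset.range (n + 1), (n - k).choose k

lemma diagSum_eq_fib (n : Nat) : diagSum n = Nat.fib (n + 1) := by
  rw [Nat.fib_succ_eq_sum_choose, Finset.Nat.sum_antidiagonal_eq_sum_range_succ_mk]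
  unfold diagSum
  rw [← Finset.sum_range_reflect]
  apply Finset.sum_congr rfl
  intro k hk
  simp only [Finset.mem_range] at hk
  congr 1; omega

-- upper bound of A's loop (exclusive)
def loopBound (n : Int) : Nat := if 0 ≤ n then n.toNat / 2 + 1 else 0

lemma loopA_eq (n : Int) (j : Nat) (r : Int) :
    loopA n j r = r + ((∑ k ∈ Finset.Ico j (loopBound n), (n.toNat - k).choose k : Nat) : Int) := by
  induction j, r using loopA.induct n with
  | case1 j r h =>
    rw [loopA, if_pos h]
    have : Finset.Ico j (loopBound n) = ∅ := by
      apply Finset.Ico_eq_empty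
      unfold loopBound
      split <;> omega
    simp [this]
  | case2 j r h ih =>
    rw [loopA, if_neg h, ih]
    have hj : j < loopBound n := by unfold loopBound; split <;> omega
    rw [Finset.sum_eq_sum_Ico_succ_bot hj]
    have hlen : (List.replicate (n - (j : Int) * 2).toNat (1 : Int)
        ++ List.replicate j (2 : Int)).length = n.toNat - j := by
      simp [List.length_replicate]; omega
    rw [combCount_eq, hlen]
    push_cast
    ring

lemma sum_Ico_eq_diagSum (n : Int) (hn : 0 ≤ n) :
    (∑ k ∈ Finset.Ico 0 (loopBound n), (n.toNat - k).choose k) = diagSum n.toNat := by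
  unfold diagSum
  rw [← Finset.range_eq_Ico]
  apply Finset.sum_subset
  · intro k hk
    simp only [Finset.mem_range] at *
    unfold loopBound at hk
    rw [if_pos hn] at hk
    omega
  · intro k hk hk'
    apply Nat.choose_eq_zero_of_lt
    simp only [Finset.mem_range] at *
    unfold loopBound at hk'
    rw [if_pos hn] at hk'
    omega

-- un-modded companion of fibLoop
def fibPure : Nat → Int → Int → Int
  | 0, _, b => b
  | k + 1, a, b => fibPure k b (a + b)

lemma fibLoop_mod (k : Nat) : ∀ a b : Int,
    fibLoop k (a % 1234567) (b % 1234567) = fibPure k a b % 1234567 := by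
  induction k with
  | zero => intro a b; simp [fibLoop, fibPure]
  | succ k ih =>
    intro a b
    rw [fibLoop, fibPure, PySem.Int.mod_eq_emod_of_pos (by norm_num), ← Int.add_emod, ih]

lemma fibPure_fib (k : Nat) : ∀ m : Nat,
    fibPure k (Nat.fib m) (Nat.fib (m + 1)) = Nat.fib (m + k + 1) := by
  induction k with
  | zero => intro m; simp [fibPure]
  | succ k ih =>
    intro m
    rw [fibPure]
    have : ((Nat.fib m : Int) + (Nat.fib (m + 1) : Int)) = (Nat.fib (m + 1 + 1) : Int) := by
      rw [Nat.fib_add_two]; push_cast; ring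
    rw [this, ih (m + 1), show m + 1 + k + 1 = m + (k + 1) + 1 by omega]

-- ===== VERDICT (by name: the statement is the Claim_ definition above) =====
theorem solution_spec : Claim_equal_solution := by
  intro n _
  unfold Spec_solution solution solution_alt
  rw [PySem.Int.mod_eq_emod_of_pos (by norm_num : (0:Int) < 1234567)]
  by_cases hn : n < 0
  · rw [if_pos hn, loopA]
    rw [if_pos (by omega : n - ((0:Nat) : Int) * 2 < 0)]
    decide
  · rw [if_neg hn, loopA_eq, sum_Ico_eq_diagSum n (by omega), diagSum_eq_fib]
    have h1 : (0 : Int) = 0 % 1234567 := by decide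
    have h2 : (1 : Int) = 1 % 1234567 := by decide
    rw [h1, h2, fibLoop_mod, show (0:Int) = ((Nat.fib 0 : Nat) : Int) by simp,
        show (1:Int) = ((Nat.fib 1 : Nat) : Int) by simp, fibPure_fib]
    simp
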